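-- pv_equiv track=rewrite | github.com/joesquito/xlsx-diff | xlsx_diff.py | get_next_excel_column_name
-- ===== SOURCE A (Python) =====
-- def get_next_excel_column_name(column_name):
--     result = ""
--     carry = 1
--     for char in reversed(column_name):
--         new_char_val = ord(char) - ord('A') + carry
--         carry = new_char_val // 26
--         result = chr(ord('A') + new_char_val % 26) + result
--     if carry:
--         result = 'A' + result
--     return result
-- ===== SOURCE B (Python) =====
-- def get_next_excel_column_name(column_name):
--     # Interpret the name as a fixed-width base-26 numeral (A=0), add one,
--     # then re-render that width back-to-front, prepending an overflow digit when the quotient is nonzero.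
--     width = len(column_name)
--     value = 0
--     for ch in column_name:
--         value = value * 26 + (ord(ch) - ord('A'))
--     total = value + 1
--     base = 26 ** width
--     digits, rest = [], total % base
--     for _ in range(width):
--         digits.append(chr(ord('A') + rest % 26))
--         rest //= 26
--     result = ''.join(reversed(digits))
--     if total // base:
--         result = 'A' + result
--     return result
-- ===== Notes on version B (the rewrite author's own statement) =====
-- stated objective: alternative
-- what changed: Replaces A's right-to-left per-character carry-propagation loop with a numeric decomposition: fold the name into one integer, add 1, then re-render it fixed-width by repeated divmod (least-significant first, reversed at the end), with the overflow quotient deciding the extra leading digit.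
import Mathlib
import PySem

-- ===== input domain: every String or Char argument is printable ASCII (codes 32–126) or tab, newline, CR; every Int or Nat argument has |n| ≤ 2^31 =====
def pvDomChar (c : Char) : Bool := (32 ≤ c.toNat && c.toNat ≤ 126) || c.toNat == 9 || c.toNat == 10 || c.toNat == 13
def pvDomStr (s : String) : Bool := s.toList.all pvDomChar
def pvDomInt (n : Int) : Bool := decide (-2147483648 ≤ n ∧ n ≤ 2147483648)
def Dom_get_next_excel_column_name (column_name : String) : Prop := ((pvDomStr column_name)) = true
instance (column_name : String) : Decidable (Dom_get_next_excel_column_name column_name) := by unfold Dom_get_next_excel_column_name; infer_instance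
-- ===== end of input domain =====

-- B replaces A's per-character carry loop by value-accumulation + fixed-width divmod re-rendering; same O(n) cost, equal on every input.

-- ===== PORT A =====
def get_next_excel_column_name (column_name : String) : String :=
  let st := column_name.toList.reverse.foldl
    (fun (st : List Char × Int) (c : Char) =>
      let newv : Int := (c.toNat : Int) - 65 + st.2
      (Char.ofNat (65 + PySem.Int.mod newv 26).toNat :: st.1, PySem.Int.floordiv newv 26))
    ([], 1)
  String.ofList (if st.2 ≠ 0 then 'A' :: st.1 else st.1)

-- ===== PORT B =====
def get_next_excel_column_name_alt (column_name : String) : String :=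
  let width := column_name.toList.length
  let value : Int := column_name.toList.foldl (fun n c => n * 26 + ((c.toNat : Int) - 65)) 0
  let total := value + 1
  let base : Int := 26 ^ width
  let st := (List.range width).foldl
    (fun (st : List Char × Int) (_ : Nat) =>
      (st.1 ++ [Char.ofNat (65 + PySem.Int.mod st.2 26).toNat], PySem.Int.floordiv st.2 26))
    ([], PySem.Int.mod total base)
  let result := st.1.reverse
  String.ofList (if PySem.Int.floordiv total base ≠ 0 then 'A' :: result else result)

-- ===== PRECONDITION & SPEC =====
def Spec_get_next_excel_column_name (column_name : String) (out : String) : Prop := out = get_next_excel_column_name_alt column_name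
instance (column_name : String) (out : String) : Decidable (Spec_get_next_excel_column_name column_name out) := by unfold Spec_get_next_excel_column_name; infer_instance

-- ===== CLAIM (what is proved, stated in full; the proofs are below) =====
def Claim_equal_get_next_excel_column_name : Prop := ∀ (column_name : String), Dom_get_next_excel_column_name column_name → Spec_get_next_excel_column_name column_name (get_next_excel_column_name column_name)

-- ===== LEMMAS AND PROOFS =====

-- digits of x in base 26, most significant first, width L (A=0)
def pvRender : Nat → Int → List Char
  | 0, _ => []
  | L + 1, x => Char.ofNat (65 + PySem.Int.mod (PySem.Int.floordiv x ((26 : Int) ^ L)) 26).toNat :: pvRender L x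

def pvVal (l : List Char) : Int := l.foldl (fun n c => n * 26 + ((c.toNat : Int) - 65)) 0

theorem pv_fdiv_fdiv (x a b : Int) (ha : 0 < a) (hb : 0 < b) :
    PySem.Int.floordiv (PySem.Int.floordiv x a) b = PySem.Int.floordiv x (a * b) := by
  rw [PySem.Int.floordiv_eq_ediv_of_pos ha, PySem.Int.floordiv_eq_ediv_of_pos hb,
    PySem.Int.floordiv_eq_ediv_of_pos (by positivity)]
  exact Int.ediv_ediv_of_nonneg ha.le

theorem pvRender_add_mul (L : Nat) (x t : Int) : pvRender L (x + t * 26 ^ L) = pvRender L x := by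
  induction L generalizing t with
  | zero => rfl
  | succ L ih =>
    simp only [pvRender]
    congr 1
    · congr 2
      have h1 : x + t * 26 ^ (L + 1) = x + (t * 26) * 26 ^ L := by ring_nf
      rw [h1]
      have h2 : PySem.Int.floordiv (x + t * 26 * 26 ^ L) (26 ^ L)
          = PySem.Int.floordiv x (26 ^ L) + t * 26 := by
        rw [PySem.Int.floordiv_eq_ediv_of_pos (by positivity),
          PySem.Int.floordiv_eq_ediv_of_pos (by positivity)]
        rw [Int.add_mul_ediv_right _ _ (by positivity : (0:Int) < (26:Int) ^ L).ne']
      rw [h2]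
      have : PySem.Int.mod (PySem.Int.floordiv x (26 ^ L) + t * 26) 26
          = PySem.Int.mod (PySem.Int.floordiv x (26 ^ L)) 26 := by
        rw [PySem.Int.mod_eq_emod_of_pos (by norm_num),
          PySem.Int.mod_eq_emod_of_pos (by norm_num)]
        omega
      rw [this]
    · have h1 : x + t * 26 ^ (L + 1) = x + (t * 26) * 26 ^ L := by ring_nf
      rw [h1, ih]

-- A's loop invariant: folding over the reversed suffix l with carry k prepends the
-- fixed-width digits of (pvVal l + k) and leaves carry (pvVal l + k) // 26^|l|.
theorem pvA_loop (l : List Char) (res : List Char) (k : Int) :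
    l.reverse.foldl
      (fun (st : List Char × Int) (c : Char) =>
        let newv : Int := (c.toNat : Int) - 65 + st.2
        (Char.ofNat (65 + PySem.Int.mod newv 26).toNat :: st.1, PySem.Int.floordiv newv 26))
      (res, k)
    = (pvRender l.length (pvVal l + k) ++ res, PySem.Int.floordiv (pvVal l + k) (26 ^ l.length)) := by
  induction l generalizing res k with
  | nil =>
    simp [pvRender, pvVal]
  | cons c l ih =>
    have hval : pvVal (c :: l) = ((c.toNat : Int) - 65) * 26 ^ l.length + pvVal l := by
      simp only [pvVal, List.foldl_cons]
      have : ∀ (m : List Char) (a b : Int),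
          m.foldl (fun n c => n * 26 + ((c.toNat : Int) - 65)) (a + b)
          = a * 26 ^ m.length + m.foldl (fun n c => n * 26 + ((c.toNat : Int) - 65)) b := by
        intro m
        induction m with
        | nil => intro a b; simp
        | cons d m ihm =>
          intro a b
          simp only [List.foldl_cons, List.length_cons]
          have : (a + b) * 26 + ((d.toNat : Int) - 65) = a * 26 + (b * 26 + ((d.toNat : Int) - 65)) := by ring
          rw [this, ihm]
          ring
      have h0 := this l ((0 : Int) * 26 + ((c.toNat : Int) - 65)) 0
      simpa using h0
    simp only [List.reverse_cons, List.foldl_append, ih, List.foldl_cons, List.foldl_nil,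
      Prod.mk.injEq]
    have hq : PySem.Int.floordiv (pvVal l + k) (26 ^ l.length) + ((c.toNat : Int) - 65)
        = PySem.Int.floordiv (pvVal (c :: l) + k) (26 ^ l.length) := by
      rw [hval]
      rw [PySem.Int.floordiv_eq_ediv_of_pos (by positivity : (0:Int) < (26:Int) ^ l.length),
        PySem.Int.floordiv_eq_ediv_of_pos (by positivity : (0:Int) < (26:Int) ^ l.length)]
      have : ((c.toNat : Int) - 65) * 26 ^ l.length + pvVal l + k
          = (pvVal l + k) + ((c.toNat : Int) - 65) * 26 ^ l.length := by ring
      rw [this, Int.add_mul_ediv_right _ _ (by positivity : (0:Int) < (26:Int) ^ l.length).ne']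
    constructor
    · have harg : (c.toNat : Int) - 65 + PySem.Int.floordiv (pvVal l + k) (26 ^ l.length)
          = PySem.Int.floordiv (pvVal (c :: l) + k) (26 ^ l.length) := by
        rw [← hq]; ring
      have hX : pvVal (c :: l) + k = (pvVal l + k) + ((c.toNat : Int) - 65) * 26 ^ l.length := by
        rw [hval]; ring
      simp only [List.length_cons, pvRender, List.cons_append]
      rw [← harg, hX, pvRender_add_mul]
    · have harg : (c.toNat : Int) - 65 + PySem.Int.floordiv (pvVal l + k) (26 ^ l.length)
          = PySem.Int.floordiv (pvVal (c :: l) + k) (26 ^ l.length) := by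
        rw [← hq]; ring
      rw [harg, pv_fdiv_fdiv _ _ _ (by positivity) (by norm_num), List.length_cons, pow_succ]

-- B's emit loop invariant: appends the least-significant-first digits of m, width L.
theorem pvB_loop (L : Nat) (acc : List Char) (m : Int) :
    (List.range L).foldl
      (fun (st : List Char × Int) (_ : Nat) =>
        (st.1 ++ [Char.ofNat (65 + PySem.Int.mod st.2 26).toNat], PySem.Int.floordiv st.2 26))
      (acc, m)
    = (acc ++ (pvRender L m).reverse, PySem.Int.floordiv m (26 ^ L)) := by
  induction L generalizing acc m with
  | zero => simp [pvRender]
  | succ L ih =>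
    rw [List.range_succ, List.foldl_append, List.foldl_cons, List.foldl_nil, ih,
      pv_fdiv_fdiv _ _ _ (by positivity : (0:Int) < 26 ^ L) (by norm_num : (0:Int) < 26),
      (by ring : ((26:Int) ^ L * 26) = 26 ^ (L + 1))]
    simp [pvRender, List.append_assoc]

theorem pvRender_mod (L : Nat) (x : Int) :
    pvRender L (PySem.Int.mod x (26 ^ L)) = pvRender L x := by
  have hpos : (0 : Int) < 26 ^ L := by positivity
  have h : PySem.Int.mod x (26 ^ L) = x + (-(PySem.Int.floordiv x (26 ^ L))) * 26 ^ L := by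
    have := PySem.Int.floordiv_mul_add_mod x (26 ^ L)
    linarith [this]
  rw [h, pvRender_add_mul]

-- ===== VERDICT (by name: the statement is the Claim_ definition above) =====
theorem get_next_excel_column_name_spec : Claim_equal_get_next_excel_column_name := by
  intro s _
  unfold Spec_get_next_excel_column_name get_next_excel_column_name get_next_excel_column_name_alt
  simp only [pvA_loop s.toList [] 1, pvB_loop, List.nil_append, List.reverse_reverse, List.append_nil]
  rw [pvRender_mod]
  simp [pvVal]
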